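-- pv_equiv track=rewrite | github.com/pchudzik/adventofcode | 2017/_21_fractal_art.py | join_pattern
-- ===== SOURCE A (Python) =====
-- def join_pattern(patterns):
--     result = ""
--
--     for items in patterns:
--         tmp = []
--         for column in items:
--             column_index = 0
--             for line in column.split("\n"):
--                 if len(tmp) <= column_index:
--                     tmp.append("")
--                 tmp[column_index] += line
--                 column_index += 1
--         result += "\n".join(tmp) + "\n"
--
--     return result.strip()
-- ===== SOURCE B (Python) =====
-- def join_pattern(patterns):
--     blocks = []
--     for items in patterns:
--         line_lists = [column.split("\n") for column in items]
--         height = max(map(len, line_lists), default=0)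
--         block = "\n".join(
--             "".join(ls[i] if i < len(ls) else "" for ls in line_lists)
--             for i in range(height)
--         )
--         blocks.append(block)
--     return "\n".join(blocks).strip()
-- ===== Notes on version B (the rewrite author's own statement) =====
-- stated objective: simpler
-- what changed: Replaces A's mutable index-tracked tmp accumulation (appending and in-place concatenating per line) with an explicit transpose: split every column into lines, read off row i as the concatenation of the i-th line of each column, join rows and row blocks with newlines, and strip once.
import Mathlib
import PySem

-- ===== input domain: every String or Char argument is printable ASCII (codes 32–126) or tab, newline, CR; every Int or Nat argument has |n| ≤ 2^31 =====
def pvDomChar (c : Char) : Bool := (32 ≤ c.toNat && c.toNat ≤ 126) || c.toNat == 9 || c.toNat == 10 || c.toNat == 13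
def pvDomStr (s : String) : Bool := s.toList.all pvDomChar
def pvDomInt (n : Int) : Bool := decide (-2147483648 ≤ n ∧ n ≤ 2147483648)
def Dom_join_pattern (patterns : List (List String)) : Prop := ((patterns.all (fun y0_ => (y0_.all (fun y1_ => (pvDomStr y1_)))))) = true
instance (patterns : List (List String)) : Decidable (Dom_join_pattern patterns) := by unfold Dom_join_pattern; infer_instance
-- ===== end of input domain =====

-- B replaces A's index-tracked mutable `tmp` accumulation by an explicit transpose
-- (row i of a block = concatenation of line i of every column); objective: simpler.

-- ===== PORT A =====
-- the inner 'for line in column.split("\n")' loop of A, carrying (tmp, column_index);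
-- Python's column_index is a nonnegative counter, so Nat is exact here
def pvAddLines (tmp : List String) (idx : Nat) (lines : List String) : List String :=
  match lines with
  | [] => tmp
  | line :: rest =>
    let tmp1 := if tmp.length ≤ idx then tmp ++ [""] else tmp
    let tmp2 := tmp1.set idx (tmp1.getD idx "" ++ line)
    pvAddLines tmp2 (idx + 1) rest

def join_pattern (patterns : List (List String)) : String :=
  let result := patterns.foldl (fun result items =>
    let tmp := items.foldl
      (fun tmp column => pvAddLines tmp 0 ((PySem.Str.split? column "\n").getD []))
      ([] : List String)
    result ++ PySem.Str.join "\n" tmp ++ "\n") ""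
  PySem.Str.strip result

-- ===== PORT B =====
def join_pattern_alt (patterns : List (List String)) : String :=
  let blocks := patterns.map (fun items =>
    let lineLists := items.map (fun column => (PySem.Str.split? column "\n").getD [])
    let height := (lineLists.map List.length).foldl max 0
    PySem.Str.join "\n" ((List.range height).map (fun i =>
      PySem.Str.join "" (lineLists.map (fun ls => if i < ls.length then ls.getD i "" else "")))))
  PySem.Str.strip (PySem.Str.join "\n" blocks)

-- ===== PRECONDITION & SPEC =====
def Spec_join_pattern (patterns : List (List String)) (out : String) : Prop := out = join_pattern_alt patterns
instance (patterns : List (List String)) (out : String) : Decidable (Spec_join_pattern patterns out) := by unfold Spec_join_pattern; infer_instance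

-- ===== CLAIM (what is proved, stated in full; the proofs are below) =====
def Claim_equal_join_pattern : Prop := ∀ (patterns : List (List String)), Dom_join_pattern patterns → Spec_join_pattern patterns (join_pattern patterns)

-- ===== LEMMAS AND PROOFS =====

-- pointwise padded merge: what one pass of A's inner loop does to tmp
def zipPad : List String → List String → List String
  | ts, [] => ts
  | [], l :: ls => l :: zipPad [] ls
  | t :: ts, l :: ls => (t ++ l) :: zipPad ts ls

@[simp] theorem zipPad_nil_right (ts : List String) : zipPad ts [] = ts := by cases ts <;> rfl

theorem length_zipPad (a b : List String) : (zipPad a b).length = max a.length b.length := by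
  induction b generalizing a with
  | nil => simp
  | cons l ls ih =>
    cases a with
    | nil => simp [zipPad, ih]
    | cons t ts => simp [zipPad, ih]

theorem getD_zipPad (a b : List String) (i : Nat) :
    (zipPad a b).getD i "" = a.getD i "" ++ b.getD i "" := by
  induction b generalizing a i with
  | nil => simp
  | cons l ls ih =>
    cases a with
    | nil =>
      cases i with
      | zero => simp [zipPad]
      | succ j => simpa [zipPad] using ih [] j
    | cons t ts =>
      cases i with
      | zero => simp [zipPad]
      | succ j => simpa [zipPad] using ih ts j

theorem pvAddLines_eq (lines : List String) (tmp : List String) (idx : Nat)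
    (h : idx ≤ tmp.length) :
    pvAddLines tmp idx lines = tmp.take idx ++ zipPad (tmp.drop idx) lines := by
  induction lines generalizing tmp idx with
  | nil => simp [pvAddLines]
  | cons line rest ih =>
    rw [pvAddLines]
    by_cases hle : tmp.length ≤ idx
    · have hidx : idx = tmp.length := le_antisymm h hle
      subst hidx
      simp only [hle, if_true]
      have hg : (tmp ++ [""]).getD tmp.length "" = "" := by
        simp [List.getD]
      have hs : (tmp ++ [""]).set tmp.length ((tmp ++ [""]).getD tmp.length "" ++ line)
          = tmp ++ [line] := by
        rw [hg]
        simp [String.empty_append]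
      rw [hs, ih (tmp ++ [line]) (tmp.length + 1) (by simp)]
      have h1 : (tmp ++ [line]).take (tmp.length + 1) = tmp ++ [line] := by simp
      have h2 : (tmp ++ [line]).drop (tmp.length + 1) = [] := by simp
      rw [h1, h2]
      simp [zipPad]
    · have hlt : idx < tmp.length := by omega
      simp only [hle, if_false]
      have hset : tmp.set idx (tmp.getD idx "" ++ line)
          = tmp.take idx ++ (tmp.getD idx "" ++ line) :: tmp.drop (idx + 1) := by
        rw [List.set_eq_take_append_cons_drop]; simp [hlt]
      rw [hset] at *
      rw [ih _ (idx + 1) (by simp; omega)]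
      have hlen : (tmp.take idx).length = idx := by simp; omega
      have h1 : (tmp.take idx ++ (tmp.getD idx "" ++ line) :: tmp.drop (idx + 1)).take (idx + 1)
          = tmp.take idx ++ [tmp.getD idx "" ++ line] := by
        rw [show idx + 1 = (tmp.take idx).length + 1 by rw [hlen]]
        rw [List.take_append]
        simp
      have h2 : (tmp.take idx ++ (tmp.getD idx "" ++ line) :: tmp.drop (idx + 1)).drop (idx + 1)
          = tmp.drop (idx + 1) := by
        rw [show idx + 1 = (tmp.take idx).length + 1 by rw [hlen]]
        rw [List.drop_append]
        simp
      rw [h1, h2]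
      have hdrop : tmp.drop idx = tmp.getD idx "" :: tmp.drop (idx + 1) := by
        rw [List.getD_eq_getElem _ _ hlt]
        exact (List.getElem_cons_drop hlt).symm
      rw [hdrop]
      simp [zipPad]

theorem length_foldl_zipPad (lls : List (List String)) (tmp : List String) :
    (lls.foldl zipPad tmp).length = (lls.map List.length).foldl max tmp.length := by
  induction lls generalizing tmp with
  | nil => simp
  | cons l ls ih => simp [List.foldl_cons, ih, length_zipPad]

theorem join_empty_nil : PySem.Str.join "" ([] : List String) = "" := by
  rw [← String.toList_inj]
  simp [PySem.Str.toList_join, PySem.Chars.join_nil]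

theorem join_empty_cons (x : String) (xs : List String) :
    PySem.Str.join "" (x :: xs) = x ++ PySem.Str.join "" xs := by
  rw [← String.toList_inj]
  cases xs with
  | nil => simp [PySem.Str.toList_join, PySem.Chars.join_singleton, PySem.Chars.join_nil]
  | cons y r => simp [PySem.Str.toList_join, PySem.Chars.join_cons_cons]

theorem getD_foldl_zipPad (lls : List (List String)) (tmp : List String) (i : Nat) :
    (lls.foldl zipPad tmp).getD i "" =
      tmp.getD i "" ++ PySem.Str.join "" (lls.map (fun ls => ls.getD i "")) := by
  induction lls generalizing tmp with
  | nil => simp [join_empty_nil]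
  | cons l ls ih =>
    simp only [List.foldl_cons, List.map_cons, ih, getD_zipPad, join_empty_cons,
      String.append_assoc]

theorem foldl_zipPad_eq (lls : List (List String)) :
    lls.foldl zipPad [] =
      (List.range ((lls.map List.length).foldl max 0)).map
        (fun i => PySem.Str.join "" (lls.map (fun ls => if i < ls.length then ls.getD i "" else ""))) := by
  apply List.ext_getElem
  · simp [length_foldl_zipPad]
  · intro i h1 h2
    rw [← List.getD_eq_getElem _ "" h1]
    rw [getD_foldl_zipPad]
    have hguard : ∀ ls : List String, (if i < ls.length then ls.getD i "" else "") = ls.getD i "" := by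
      intro ls
      split
      · rfl
      · rw [List.getD_eq_default]; omega
    have hmap : (List.map (fun ls => if i < ls.length then ls.getD i "" else "") lls)
        = List.map (fun ls : List String => ls.getD i "") lls :=
      List.map_congr_left (fun ls _ => hguard ls)
    rw [List.getElem_map, List.getElem_range, hmap]
    have h0 : ([] : List String).getD i "" = "" := rfl
    rw [h0, String.empty_append]

theorem row_eq (items : List String) :
    (items.foldl (fun tmp column => pvAddLines tmp 0 ((PySem.Str.split? column "\n").getD []))
        ([] : List String)) =
      (List.range (((items.map (fun column => (PySem.Str.split? column "\n").getD [])).map List.length).foldl max 0)).map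
        (fun i => PySem.Str.join ""
          ((items.map (fun column => (PySem.Str.split? column "\n").getD [])).map
            (fun ls => if i < ls.length then ls.getD i "" else ""))) := by
  have h0 : ∀ (tmp : List String) (x : List String), pvAddLines tmp 0 x = zipPad tmp x := by
    intro tmp x
    rw [pvAddLines_eq x tmp 0 (Nat.zero_le _)]
    simp
  calc items.foldl (fun tmp column => pvAddLines tmp 0 ((PySem.Str.split? column "\n").getD [])) []
      = items.foldl (fun tmp column => zipPad tmp ((PySem.Str.split? column "\n").getD [])) [] := by
        simp only [h0]
    _ = (items.map (fun column => (PySem.Str.split? column "\n").getD [])).foldl zipPad [] := by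
        rw [List.foldl_map]
    _ = _ := foldl_zipPad_eq _

theorem join_str_singleton (sep b : String) : PySem.Str.join sep [b] = b := by
  rw [← String.toList_inj]
  simp [PySem.Str.toList_join, PySem.Chars.join_singleton]

theorem join_str_cons_cons (sep b y : String) (r : List String) :
    PySem.Str.join sep (b :: y :: r) = b ++ sep ++ PySem.Str.join sep (y :: r) := by
  rw [← String.toList_inj]
  simp [PySem.Str.toList_join, PySem.Chars.join_cons_cons]

theorem foldl_terminated (blocks : List String) (r0 : String) (h : blocks ≠ []) :
    blocks.foldl (fun r b => r ++ b ++ "\n") r0 = r0 ++ PySem.Str.join "\n" blocks ++ "\n" := by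
  induction blocks generalizing r0 with
  | nil => exact absurd rfl h
  | cons b bs ih =>
    cases bs with
    | nil => simp [join_str_singleton]
    | cons y r =>
      rw [List.foldl_cons, ih (r0 ++ b ++ "\n") (by simp), join_str_cons_cons]
      simp [String.append_assoc]

theorem strip_append_newline (a : List Char) :
    PySem.Chars.strip (a ++ ['\n']) = PySem.Chars.strip a := by
  unfold PySem.Chars.strip PySem.Chars.lstrip PySem.Chars.rstrip
  rw [List.dropWhile_append]
  have hn : PySem.Chars.isspace '\n' = true := by decide
  split
  · next h =>
    have h' : List.dropWhile PySem.Chars.isspace a = [] := by simpa using h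
    simp [h', hn]
  · rw [List.reverse_append]
    simp [hn]

theorem strip_terminated_eq_strip_joined (blocks : List String) :
    PySem.Str.strip (blocks.foldl (fun r b => r ++ b ++ "\n") "") =
      PySem.Str.strip (PySem.Str.join "\n" blocks) := by
  cases blocks with
  | nil =>
    have : PySem.Str.join "\n" ([] : List String) = "" := by
      rw [← String.toList_inj]; simp [PySem.Str.toList_join, PySem.Chars.join_nil]
    rw [this]; simp
  | cons b bs =>
    rw [foldl_terminated (b :: bs) "" (by simp), String.empty_append]
    rw [← String.toList_inj]
    simp only [PySem.Str.toList_strip, String.toList_append]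
    have : ("\n" : String).toList = ['\n'] := rfl
    rw [this]
    exact strip_append_newline _

theorem main_eq (patterns : List (List String)) : join_pattern patterns = join_pattern_alt patterns := by
  unfold join_pattern join_pattern_alt
  have hfun : (fun (result : String) (items : List String) =>
      result ++ PySem.Str.join "\n"
        (items.foldl (fun tmp column => pvAddLines tmp 0 ((PySem.Str.split? column "\n").getD [])) []) ++ "\n")
    = (fun (result : String) (items : List String) =>
      result ++ (fun items : List String =>
        PySem.Str.join "\n" ((List.range (((items.map (fun column => (PySem.Str.split? column "\n").getD [])).map List.length).foldl max 0)).map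
          (fun i => PySem.Str.join ""
            ((items.map (fun column => (PySem.Str.split? column "\n").getD [])).map
              (fun ls => if i < ls.length then ls.getD i "" else ""))))) items ++ "\n") := by
    funext result items
    rw [row_eq]
  rw [hfun]
  rw [show ∀ (g : List String → String),
      patterns.foldl (fun r items => r ++ g items ++ "\n") "" = (patterns.map g).foldl (fun r b => r ++ b ++ "\n") ""
    from fun g => by rw [List.foldl_map]]
  exact strip_terminated_eq_strip_joined _

-- ===== VERDICT (by name: the statement is the Claim_ definition above) =====
theorem join_pattern_spec : Claim_equal_join_pattern := by
  intro patterns _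
  unfold Spec_join_pattern
  exact main_eq patterns
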